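-- pv_equiv track=rewrite | github.com/patmeh1/SqlNLP_AgentFramework_demo | agents/vector_enhanced_meddata_agent.py | build_context_from_vector_results
-- ===== SOURCE A (Python) =====
-- from typing import List, Dict, Any, Optional
--
-- def build_context_from_vector_results(vector_results: List[Dict]) -> str:
--     """Build context string from vector search results"""
--     if not vector_results:
--         return ""
--
--     context_parts = ["Based on semantic search of the MedData database:\n"]
--
--     # Group by entity type
--     by_type = {}
--     for result in vector_results:
--         entity_type = result.get("entity_type", "UNKNOWN")
--         if entity_type not in by_type:
--             by_type[entity_type] = []
--         by_type[entity_type].append(result)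
--
--     # Add slot definitions
--     if "SLOT_DEFINITION" in by_type:
--         context_parts.append("\nRelevant Slot Definitions:")
--         for item in by_type["SLOT_DEFINITION"]:
--             context_parts.append(f"  - Slot {item['slot_number']}: {item['slot_name']}")
--
--     # Add medical codes
--     if "MEDICAL_CODE" in by_type:
--         context_parts.append("\nRelevant Medical Codes:")
--         for item in by_type["MEDICAL_CODE"][:3]:  # Top 3
--             context_parts.append(f"  - Code {item['code']}: {item['content']}")
--
--     # Add relationships
--     if "RELATIONSHIP" in by_type:
--         context_parts.append("\nRelevant Relationships:")
--         for item in by_type["RELATIONSHIP"][:3]:  # Top 3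
--             context_parts.append(f"  - {item['content']}")
--
--     return "\n".join(context_parts)
-- ===== SOURCE B (Python) =====
-- def build_context_from_vector_results(vector_results):
--     """Build context string from vector search results"""
--     if not vector_results:
--         return ""
--
--     slots = [r for r in vector_results
--              if r.get("entity_type", "UNKNOWN") == "SLOT_DEFINITION"]
--     codes = [r for r in vector_results
--              if r.get("entity_type", "UNKNOWN") == "MEDICAL_CODE"][:3]
--     rels = [r for r in vector_results
--             if r.get("entity_type", "UNKNOWN") == "RELATIONSHIP"][:3]
--
--     parts = ["Based on semantic search of the MedData database:\n"]
--     if slots: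
--         parts.append("\nRelevant Slot Definitions:")
--         parts.extend(f"  - Slot {r['slot_number']}: {r['slot_name']}" for r in slots)
--     if codes:
--         parts.append("\nRelevant Medical Codes:")
--         parts.extend(f"  - Code {r['code']}: {r['content']}" for r in codes)
--     if rels:
--         parts.append("\nRelevant Relationships:")
--         parts.extend(f"  - {r['content']}" for r in rels)
--     return "\n".join(parts)
-- ===== Notes on version B (the rewrite author's own statement) =====
-- stated objective: simpler
-- what changed: Replaces the one-pass grouping dict keyed by entity_type with three direct filtering comprehensions (one per section, slicing the code/relationship lists to 3 up front), emitting each section when its filtered list is non-empty.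
import Mathlib
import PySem

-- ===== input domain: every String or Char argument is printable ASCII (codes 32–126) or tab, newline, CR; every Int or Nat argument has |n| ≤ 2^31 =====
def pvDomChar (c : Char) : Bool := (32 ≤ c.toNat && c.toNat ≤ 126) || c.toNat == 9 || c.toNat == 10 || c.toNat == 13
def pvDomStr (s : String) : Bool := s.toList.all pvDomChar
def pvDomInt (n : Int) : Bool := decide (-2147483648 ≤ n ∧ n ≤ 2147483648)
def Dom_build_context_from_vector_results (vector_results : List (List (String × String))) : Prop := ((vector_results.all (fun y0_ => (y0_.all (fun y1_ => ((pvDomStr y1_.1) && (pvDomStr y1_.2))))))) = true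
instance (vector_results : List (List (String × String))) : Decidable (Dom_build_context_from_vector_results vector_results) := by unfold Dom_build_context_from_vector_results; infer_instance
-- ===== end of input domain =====

-- B drops A's grouping dict: three filtering passes (one per section) build the same parts list.
-- Equivalence is about the RETURN value; neither program mutates its argument.

-- shared small helpers: result.get("entity_type", "UNKNOWN") and item['k'] (total form; Pre_ guarantees the key is present)
def pvKey (r : List (String × String)) : String := (PySem.Dict.mk r).getD "entity_type" "UNKNOWN"
def pvField (r : List (String × String)) (k : String) : String := ((PySem.Dict.mk r).get? k).getD ""

-- ===== PORT A =====
def pvGroupStep (d : PySem.Dict String (List (List (String × String)))) (r : List (String × String)) :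
    PySem.Dict String (List (List (String × String))) :=
  let t := pvKey r
  let d1 := if d.contains t then d else d.insert t []
  d1.modify t [] (fun l => l ++ [r])

def build_context_from_vector_results (vector_results : List (List (String × String))) : String :=
  if vector_results = [] then "" else
  let context_parts : List String := ["Based on semantic search of the MedData database:\n"]
  let by_type := vector_results.foldl pvGroupStep PySem.Dict.empty
  let context_parts := if by_type.contains "SLOT_DEFINITION" then
      (by_type.getD "SLOT_DEFINITION" []).foldl
        (fun ps item => ps ++ ["  - Slot " ++ pvField item "slot_number" ++ ": " ++ pvField item "slot_name"])
        (context_parts ++ ["\nRelevant Slot Definitions:"])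
    else context_parts
  let context_parts := if by_type.contains "MEDICAL_CODE" then
      (PySem.List.slice (by_type.getD "MEDICAL_CODE" []) none (some 3)).foldl
        (fun ps item => ps ++ ["  - Code " ++ pvField item "code" ++ ": " ++ pvField item "content"])
        (context_parts ++ ["\nRelevant Medical Codes:"])
    else context_parts
  let context_parts := if by_type.contains "RELATIONSHIP" then
      (PySem.List.slice (by_type.getD "RELATIONSHIP" []) none (some 3)).foldl
        (fun ps item => ps ++ ["  - " ++ pvField item "content"])
        (context_parts ++ ["\nRelevant Relationships:"])
    else context_parts
  PySem.Str.join "\n" context_parts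

-- ===== PORT B =====
def build_context_from_vector_results_alt (vector_results : List (List (String × String))) : String :=
  if vector_results = [] then "" else
  let slots := vector_results.filter (fun r => pvKey r == "SLOT_DEFINITION")
  let codes := (vector_results.filter (fun r => pvKey r == "MEDICAL_CODE")).take 3
  let rels := (vector_results.filter (fun r => pvKey r == "RELATIONSHIP")).take 3
  let parts : List String := ["Based on semantic search of the MedData database:\n"]
    ++ (if slots.isEmpty then [] else
        "\nRelevant Slot Definitions:" ::
          slots.map (fun r => "  - Slot " ++ pvField r "slot_number" ++ ": " ++ pvField r "slot_name"))
    ++ (if codes.isEmpty then [] else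
        "\nRelevant Medical Codes:" ::
          codes.map (fun r => "  - Code " ++ pvField r "code" ++ ": " ++ pvField r "content"))
    ++ (if rels.isEmpty then [] else
        "\nRelevant Relationships:" :: rels.map (fun r => "  - " ++ pvField r "content"))
  PySem.Str.join "\n" parts

-- ===== PRECONDITION & SPEC =====
-- Pre_ excludes exactly the inputs where A raises KeyError: an item whose section is emitted
-- (all SLOT_DEFINITION items, the first three MEDICAL_CODE / RELATIONSHIP items) lacks a formatted key.
def pvHasKey (r : List (String × String)) (k : String) : Prop := ((PySem.Dict.mk r).get? k).isSome = true

def Pre_build_context_from_vector_results (vector_results : List (List (String × String))) : Prop :=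
  (∀ r ∈ vector_results.filter (fun r => pvKey r == "SLOT_DEFINITION"),
      pvHasKey r "slot_number" ∧ pvHasKey r "slot_name") ∧
  (∀ r ∈ (vector_results.filter (fun r => pvKey r == "MEDICAL_CODE")).take 3,
      pvHasKey r "code" ∧ pvHasKey r "content") ∧
  (∀ r ∈ (vector_results.filter (fun r => pvKey r == "RELATIONSHIP")).take 3,
      pvHasKey r "content")

instance (vector_results : List (List (String × String))) : Decidable (Pre_build_context_from_vector_results vector_results) := by
  unfold Pre_build_context_from_vector_results pvHasKey; infer_instance

def pvWitness_build_context_from_vector_results : (List (List (String × String))) :=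
  [[("entity_type", "SLOT_DEFINITION"), ("slot_number", "1"), ("slot_name", "Name")],
   [("entity_type", "MEDICAL_CODE"), ("code", "A01"), ("content", "cholera")]]

def Spec_build_context_from_vector_results (vector_results : List (List (String × String))) (out : String) : Prop := out = build_context_from_vector_results_alt vector_results
instance (vector_results : List (List (String × String))) (out : String) : Decidable (Spec_build_context_from_vector_results vector_results out) := by unfold Spec_build_context_from_vector_results; infer_instance

-- ===== CLAIM (what is proved, stated in full; the proofs are below) =====
def Claim_equal_build_context_from_vector_results : Prop := ∀ (vector_results : List (List (String × String))), Dom_build_context_from_vector_results vector_results → Pre_build_context_from_vector_results vector_results → Spec_build_context_from_vector_results vector_results (build_context_from_vector_results vector_results)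

-- ===== LEMMAS AND PROOFS =====

-- the grouping loop characterised: looking a key up in the finished dict is filtering the input
theorem group_get? (rs : List (List (String × String)))
    (d : PySem.Dict String (List (List (String × String)))) (t : String) :
    ((rs.foldl pvGroupStep d).get? t) =
      (if rs.filter (fun r => pvKey r == t) = [] then d.get? t
       else some (d.getD t [] ++ rs.filter (fun r => pvKey r == t))) := by
  induction rs generalizing d with
  | nil => simp
  | cons r rest ih =>
    simp only [List.foldl_cons, List.filter_cons, ih]
    by_cases hk : pvKey r = t
    · have hstep_get : (pvGroupStep d r).get? t = some (d.getD t [] ++ [r]) := by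
        simp only [pvGroupStep, hk, PySem.Dict.modify]
        rw [PySem.Dict.get?_insert]
        by_cases hc : d.contains t = true
        · simp [hc]
        · simp only [Bool.not_eq_true] at hc
          simp [hc, PySem.Dict.getD_of_not_contains d ([] : List (List (String × String))) hc]
      have hstep_getD : (pvGroupStep d r).getD t [] = d.getD t [] ++ [r] := by
        rw [PySem.Dict.getD_eq_get?_getD, hstep_get]; rfl
      simp only [hk, hstep_get, hstep_getD, beq_self_eq_true, if_true, List.cons_ne_nil, if_false]
      split <;> simp_all
    · have hne : t ≠ pvKey r := fun h => hk h.symm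
      have hstep_get : (pvGroupStep d r).get? t = d.get? t := by
        simp only [pvGroupStep, PySem.Dict.modify]
        rw [PySem.Dict.get?_insert]
        simp only [hne, if_false]
        split
        · rfl
        · rw [PySem.Dict.get?_insert]; simp [hne]
      have hstep_getD : (pvGroupStep d r).getD t [] = d.getD t [] := by
        rw [PySem.Dict.getD_eq_get?_getD, hstep_get, PySem.Dict.getD_eq_get?_getD]
      simp [hk, hstep_get, hstep_getD]

theorem slice_to_3 (xs : List (List (String × String))) :
    PySem.List.slice xs none (some 3) = xs.take 3 := by
  simp [PySem.List.slice_to]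

-- ===== VERDICT (by name: the statement is the Claim_ definition above) =====
theorem build_context_from_vector_results_spec : Claim_equal_build_context_from_vector_results := by
  intro vr _ _
  unfold Spec_build_context_from_vector_results
  unfold build_context_from_vector_results build_context_from_vector_results_alt
  by_cases hvr : vr = []
  · simp [hvr]
  · simp only [hvr, if_false]
    have hget := fun t => group_get? vr PySem.Dict.empty t
    have hcon : ∀ t, ((vr.foldl pvGroupStep PySem.Dict.empty).contains t) =
        !(vr.filter (fun r => pvKey r == t)).isEmpty := by
      intro t
      rw [PySem.Dict.contains_eq_isSome_get?, hget t]
      split <;> simp_all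
    have hgetD : ∀ t, ((vr.foldl pvGroupStep PySem.Dict.empty).getD t []) =
        vr.filter (fun r => pvKey r == t) := by
      intro t
      rw [PySem.Dict.getD_eq_get?_getD, hget t]
      split <;> simp_all
    have htake : ∀ (l : List (List (String × String))), (l.take 3).isEmpty = l.isEmpty := by
      intro l; cases l <;> rfl
    simp only [hcon, hgetD, slice_to_3, PySem.List.foldl_append_singleton_eq_map, htake,
      List.map_take]
    cases h1 : (vr.filter (fun r => pvKey r == "SLOT_DEFINITION")).isEmpty <;>
    cases h2 : (vr.filter (fun r => pvKey r == "MEDICAL_CODE")).isEmpty <;>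
    cases h3 : (vr.filter (fun r => pvKey r == "RELATIONSHIP")).isEmpty <;>
    simp [h1, h2, h3, List.append_assoc]
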